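-- pv_equiv track=rewrite | github.com/swilsonmelo/UVA--Online-Judge | 10101-Bangla Numbers.py | func
-- ===== SOURCE A (Python) =====
-- def func(n):
--     d1 = n % 100
--     n //= 100
--     d2 = n % 10
--     n //= 10
--     d3 = n % 100
--     n //= 100
--     d4 = n % 100
--     n //= 100
--     if n > 100:
--         result = func(n)
--         result.append('kuti')
--     else:
--         result = []
--     if d4:
--         result.append(str(d4))
--         result.append('lakh')
--     if d3:
--         result.append(str(d3))
--         result.append('hajar')
--     if d2:
--         result.append(str(d2))
--         result.append('shata')
--     if d1:
--         result.append(str(d1))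
--     return result
-- ===== SOURCE B (Python) =====
-- def _groups(c):
--     g = []
--     for div, mod, name in ((100000, 100, 'lakh'), (1000, 100, 'hajar'), (100, 10, 'shata')):
--         d = (c // div) % mod
--         if d:
--             g += [str(d), name]
--     d = c % 100
--     if d:
--         g.append(str(d))
--     return g
--
--
-- def func(n):
--     chunks = [n]
--     while chunks[-1] // 10**7 > 100:
--         chunks.append(chunks[-1] // 10**7)
--     words = []
--     for c in reversed(chunks[1:]):
--         words += _groups(c)
--         words.append('kuti')
--     words += _groups(chunks[0])
--     return words
-- ===== Notes on version B (the rewrite author's own statement) =====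
-- stated objective: alternative
-- what changed: Replaces A's recursion with an explicit iterative loop that collects the seven-digit chunk values into a list, then builds the words by folding over the reversed chunk list with a reusable group helper.
import Mathlib
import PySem

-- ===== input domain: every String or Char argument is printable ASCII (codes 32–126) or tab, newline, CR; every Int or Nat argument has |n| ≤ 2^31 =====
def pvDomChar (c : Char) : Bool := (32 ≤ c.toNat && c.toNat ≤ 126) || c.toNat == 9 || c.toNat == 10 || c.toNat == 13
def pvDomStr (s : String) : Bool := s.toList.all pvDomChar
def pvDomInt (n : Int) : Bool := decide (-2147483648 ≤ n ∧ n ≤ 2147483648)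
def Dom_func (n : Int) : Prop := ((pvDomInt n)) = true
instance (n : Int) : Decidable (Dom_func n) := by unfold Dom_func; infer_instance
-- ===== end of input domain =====

-- B replaces A's recursion by an explicit loop collecting seven-digit chunk values, then folds over the
-- reversed chunk list with a shared group helper; alternative decomposition, same cost.


-- termination helper for both recursions (cited by the ports' decreasing_by)
theorem pvDescend (a : Int) (h : 100 < a.fdiv (10 ^ 7)) : (a.fdiv (10 ^ 7)).toNat < a.toNat := by
  have heq := PySem.Int.floordiv_mul_add_mod a (10 ^ 7)
  have h1 := PySem.Int.mod_nonneg a (b := 10 ^ 7) (by norm_num)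
  have h2 := PySem.Int.mod_lt a (b := 10 ^ 7) (by norm_num)
  simp only [PySem.Int.floordiv, PySem.Int.mod] at *
  omega

theorem pvChain (n : Int) :
    PySem.Int.floordiv (PySem.Int.floordiv (PySem.Int.floordiv (PySem.Int.floordiv n 100) 10) 100) 100
      = n.fdiv (10 ^ 7) := by
  simp only [PySem.Int.floordiv]
  rw [Int.fdiv_fdiv_eq_fdiv_mul _ (by norm_num) (by norm_num),
      Int.fdiv_fdiv_eq_fdiv_mul _ (by norm_num) (by norm_num),
      Int.fdiv_fdiv_eq_fdiv_mul _ (by norm_num) (by norm_num)]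
  norm_num

-- ===== PORT A =====
def func (n : Int) : List String :=
  let d1 := PySem.Int.mod n 100
  let n1 := PySem.Int.floordiv n 100
  let d2 := PySem.Int.mod n1 10
  let n2 := PySem.Int.floordiv n1 10
  let d3 := PySem.Int.mod n2 100
  let n3 := PySem.Int.floordiv n2 100
  let d4 := PySem.Int.mod n3 100
  let n4 := PySem.Int.floordiv n3 100
  let result := if 100 < n4 then func n4 ++ ["kuti"] else []
  let result := if d4 ≠ 0 then result ++ [PySem.Int.toStr d4, "lakh"] else result
  let result := if d3 ≠ 0 then result ++ [PySem.Int.toStr d3, "hajar"] else result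
  let result := if d2 ≠ 0 then result ++ [PySem.Int.toStr d2, "shata"] else result
  if d1 ≠ 0 then result ++ [PySem.Int.toStr d1] else result
termination_by n.toNat
decreasing_by
  rename_i h
  have := pvDescend n (by rw [← pvChain n]; exact h)
  rw [← pvChain n] at this
  exact this

-- ===== PORT B =====
-- _groups: loop over the (div, mod, name) triples, then the last-two-digits group
def pvGroups (c : Int) : List String :=
  let g := ([(100000, 100, "lakh"), (1000, 100, "hajar"), (100, 10, "shata")] :
      List (Int × Int × String)).foldl
    (fun g t =>
      let d := PySem.Int.mod (PySem.Int.floordiv c t.1) t.2.1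
      if d ≠ 0 then g ++ [PySem.Int.toStr d, t.2.2] else g) []
  let d := PySem.Int.mod c 100
  if d ≠ 0 then g ++ [PySem.Int.toStr d] else g

-- the while-loop collecting the chunk values
def pvChunks (v : Int) : List Int :=
  if 100 < PySem.Int.floordiv v (10 ^ 7) then v :: pvChunks (PySem.Int.floordiv v (10 ^ 7)) else [v]
termination_by v.toNat
decreasing_by exact pvDescend v (by assumption)

def func_alt (n : Int) : List String :=
  let chunks := pvChunks n
  (chunks.drop 1).reverse.foldl (fun w c => w ++ (pvGroups c ++ ["kuti"])) []
    ++ pvGroups (chunks.headD 0)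

-- ===== PRECONDITION & SPEC =====
def Spec_func (n : Int) (out : List String) : Prop := out = func_alt n
instance (n : Int) (out : List String) : Decidable (Spec_func n out) := by unfold Spec_func; infer_instance

-- ===== CLAIM (what is proved, stated in full; the proofs are below) =====
def Claim_equal_func : Prop := ∀ (n : Int), Dom_func n → Spec_func n (func n)

-- ===== LEMMAS AND PROOFS =====

-- unfold func one level
theorem func_eq (n : Int) :
    func n = (if 100 < n.fdiv (10 ^ 7) then func (n.fdiv (10 ^ 7)) ++ ["kuti"] else [])
      ++ pvGroups n := by
  rw [func]
  simp only [pvGroups, List.foldl, pvChain n]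
  have h2 : PySem.Int.floordiv n 1000 = PySem.Int.floordiv (PySem.Int.floordiv n 100) 10 := by
    simp only [PySem.Int.floordiv]
    rw [Int.fdiv_fdiv_eq_fdiv_mul _ (by norm_num) (by norm_num)]; norm_num
  have h3 : PySem.Int.floordiv n 100000
      = PySem.Int.floordiv (PySem.Int.floordiv (PySem.Int.floordiv n 100) 10) 100 := by
    simp only [PySem.Int.floordiv]
    rw [Int.fdiv_fdiv_eq_fdiv_mul _ (by norm_num) (by norm_num),
        Int.fdiv_fdiv_eq_fdiv_mul _ (by norm_num) (by norm_num)]; norm_num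
  rw [h2, h3]
  split_ifs <;> simp

theorem pvChunks_cons (v : Int) : ∃ rest, pvChunks v = v :: rest := by
  rw [pvChunks]; split_ifs <;> exact ⟨_, rfl⟩

theorem func_alt_eq (n : Int) :
    func_alt n = ((pvChunks n).drop 1).reverse.flatMap (fun c => pvGroups c ++ ["kuti"])
      ++ pvGroups n := by
  obtain ⟨rest, hr⟩ := pvChunks_cons n
  simp [func_alt, hr, List.flatMap_def, List.map_reverse]

theorem main_eq : ∀ (k : Nat) (n : Int), n.toNat = k → func n = func_alt n := by
  intro k
  induction k using Nat.strong_induction_on with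
  | _ k ih =>
    intro n hk
    rw [func_eq, func_alt_eq]
    by_cases h : 100 < n.fdiv (10 ^ 7)
    · have hlt : (n.fdiv (10 ^ 7)).toNat < k := hk ▸ pvDescend n h
      have hchunks : pvChunks n = n :: pvChunks (n.fdiv (10 ^ 7)) := by
        rw [pvChunks, if_pos (by simpa [PySem.Int.floordiv] using h)]; rfl
      obtain ⟨rest, hr⟩ := pvChunks_cons (n.fdiv (10 ^ 7))
      have hrec := ih _ hlt (n.fdiv (10 ^ 7)) rfl
      rw [func_alt_eq, hr] at hrec
      simp only [hchunks, h, if_pos, List.drop_one, List.tail_cons, hr, List.reverse_cons,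
        List.flatMap_append, List.flatMap_cons, List.flatMap_nil, List.append_nil] at *
      rw [hrec]
      simp
    · have hchunks : pvChunks n = [n] := by
        rw [pvChunks, if_neg (by simpa [PySem.Int.floordiv] using h)]
      have h' : ¬ 100 < n.fdiv 10000000 := by norm_num at h ⊢; exact h
      simp [hchunks, h']

-- ===== VERDICT (by name: the statement is the Claim_ definition above) =====
theorem func_spec : Claim_equal_func := by
  intro n _
  unfold Spec_func
  exact main_eq n.toNat n rfl
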